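-- pv_equiv track=rewrite | github.com/Carson7822/Python-Fundamentals-CSE174 | Projects/project_3.py | add_divisibles
-- ===== SOURCE A (Python) =====
-- def add_divisibles(num: int) -> int:
--     """
--     This function takes a number, finds all of the other numbers that it can be
--     divided by, and adds all of those numbers up for a final value
--
--     Args:
--         (num) the number that is entered into the function
--     Returns:
--         (final_answer) all of the numbers added up
--     """
--     if num <= 1:
--         return 0
--     final_answer = 0
--
--     for num_check in range(1, num):
--         if num % num_check == 0 and num_check % 2 == 0:
--             final_answer += num_check
--     return final_answer
-- ===== SOURCE B (Python) =====
-- def add_divisibles(num: int) -> int: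
--     if num <= 1:
--         return 0
--     total = 0
--     d = 1
--     while d * d <= num:
--         if num % d == 0:
--             if d % 2 == 0:
--                 total += d
--             q = num // d
--             if q != d and q != num and q % 2 == 0:
--                 total += q
--         d += 1
--     return total
-- ===== Notes on version B (the rewrite author's own statement) =====
-- stated objective: faster
-- what changed: B enumerates divisors in pairs (d, num//d) only up to sqrt(num) instead of scanning every number below num, summing the even ones and excluding num itself.
import Mathlib
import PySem

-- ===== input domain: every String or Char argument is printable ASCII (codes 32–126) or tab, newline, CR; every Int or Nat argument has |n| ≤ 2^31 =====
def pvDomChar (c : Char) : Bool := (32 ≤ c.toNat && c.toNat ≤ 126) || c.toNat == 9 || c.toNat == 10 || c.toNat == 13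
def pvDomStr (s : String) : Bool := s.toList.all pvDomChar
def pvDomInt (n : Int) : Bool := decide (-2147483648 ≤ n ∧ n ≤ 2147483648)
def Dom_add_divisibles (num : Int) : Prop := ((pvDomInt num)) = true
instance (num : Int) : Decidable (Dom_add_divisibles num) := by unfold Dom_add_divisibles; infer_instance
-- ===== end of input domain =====

-- B replaces A's linear scan below num by paired divisor enumeration up to sqrt(num) (asymptotically fewer iterations).


-- ===== PORT A =====
def add_divisibles (num : Int) : Int :=
  if num ≤ 1 then 0
  else
    (PySem.List.pyRange 1 num 1).foldl
      (fun acc d => if PySem.Int.mod num d = 0 ∧ PySem.Int.mod d 2 = 0 then acc + d else acc) 0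

-- ===== PORT B =====
-- while d * d <= num: collect d and q = num // d when they are even proper divisors
def pvAltLoop (n : Nat) (d : Nat) (total : Int) : Int :=
  if _h : d * d ≤ n then
    pvAltLoop n (d + 1)
      (if n % d = 0 then
        (let t2 := if d % 2 = 0 then total + (d : Int) else total
         let q := n / d
         if q ≠ d ∧ q ≠ n ∧ q % 2 = 0 then t2 + (q : Int) else t2)
       else total)
  else total
termination_by n + 1 - d
decreasing_by
  have hd : d ≤ n := by
    rcases Nat.eq_zero_or_pos d with h0 | h0
    · omega
    · calc d = d * 1 := (Nat.mul_one d).symm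
        _ ≤ d * d := Nat.mul_le_mul_left d h0
        _ ≤ n := _h
  omega

def add_divisibles_alt (num : Int) : Int :=
  if num ≤ 1 then 0 else pvAltLoop num.toNat 1 0

-- ===== PRECONDITION & SPEC =====
def Spec_add_divisibles (num : Int) (out : Int) : Prop := out = add_divisibles_alt num
instance (num : Int) (out : Int) : Decidable (Spec_add_divisibles num out) := by unfold Spec_add_divisibles; infer_instance

-- ===== CLAIM (what is proved, stated in full; the proofs are below) =====
def Claim_equal_add_divisibles : Prop := ∀ (num : Int), Dom_add_divisibles num → Spec_add_divisibles num (add_divisibles num)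

-- ===== LEMMAS AND PROOFS =====

-- the set of even proper divisors of n, the common value both programs sum
def pvTarget (n : Nat) : Finset Nat := n.divisors.filter (fun d => d % 2 = 0 ∧ d ≠ n)

theorem pv_mod_eq_zero {n d : Nat} (h : d ∣ n) : n % d = 0 := by
  obtain ⟨c, rfl⟩ := h
  simp [Nat.mul_mod_right]

-- generic: a "conditional add" foldl is init + sum of an ite-map
theorem pv_foldl_ite_add (P : Int → Prop) [DecidablePred P] :
    ∀ (l : List Int) (init : Int),
      l.foldl (fun acc d => if P d then acc + d else acc) init
        = init + (l.map (fun d => if P d then d else 0)).sum := by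
  intro l
  induction l with
  | nil => intro init; simp
  | cons x xs ih =>
    intro init
    simp only [List.foldl_cons, List.map_cons, List.sum_cons, ih]
    split_ifs <;> ring

theorem pv_list_range_sum (F : Nat → Int) : ∀ (m : Nat),
    ((List.range m).map F).sum = ∑ k ∈ Finset.range m, F k := by
  intro m
  induction m with
  | zero => simp
  | succ m ih => simp [List.range_succ, Finset.sum_range_succ, ih]

theorem pv_A_eq_sum (n : Nat) (hn : 2 ≤ n) :
    add_divisibles (n : Int)
      = ∑ d ∈ Finset.Ico 1 n, (if n % d = 0 ∧ d % 2 = 0 then (d : Int) else 0) := by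
  have hgt : ¬ ((n : Int) ≤ 1) := by exact_mod_cast by omega
  rw [add_divisibles, if_neg hgt]
  rw [pv_foldl_ite_add (fun d => PySem.Int.mod (n : Int) d = 0 ∧ PySem.Int.mod d 2 = 0)]
  rw [PySem.List.pyRange_one, List.map_map, zero_add]
  have hlen : ((n : Int) - 1).toNat = n - 1 := by omega
  rw [hlen, pv_list_range_sum, Finset.sum_Ico_eq_sum_range]
  apply Finset.sum_congr rfl
  intro k _
  simp only [Function.comp]
  have h1 : ((1 : Int) + k) = ((1 + k : Nat) : Int) := by push_cast; ring
  rw [h1]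
  have hm1 : PySem.Int.mod (n : Int) ((1 + k : Nat) : Int) = ((n % (1 + k) : Nat) : Int) :=
    PySem.Int.mod_natCast n (1 + k)
  have hm2 : PySem.Int.mod ((1 + k : Nat) : Int) 2 = (((1 + k) % 2 : Nat) : Int) := by
    exact_mod_cast PySem.Int.mod_natCast (1 + k) 2
  have hcond : (PySem.Int.mod (n : Int) ((1 + k : Nat) : Int) = 0 ∧
      PySem.Int.mod ((1 + k : Nat) : Int) 2 = 0) ↔ (n % (1 + k) = 0 ∧ (1 + k) % 2 = 0) := by
    rw [hm1, hm2]
    constructor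
    · rintro ⟨u, v⟩
      exact ⟨by exact_mod_cast u, by exact_mod_cast v⟩
    · rintro ⟨u, v⟩
      exact ⟨by exact_mod_cast congrArg (Nat.cast : Nat → Int) u,
             by exact_mod_cast congrArg (Nat.cast : Nat → Int) v⟩
  simp only [hcond]

-- the per-step contribution of B's loop body
def pvC (n d : Nat) : Int :=
  (if n % d = 0 ∧ d % 2 = 0 then (d : Int) else 0)
    + (if n % d = 0 ∧ n / d ≠ d ∧ n / d ≠ n ∧ (n / d) % 2 = 0 then ((n / d : Nat) : Int) else 0)

theorem pv_loop_eq_sum (n : Nat) :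
    ∀ (j d : Nat) (total : Int), Nat.sqrt n + 1 - d ≤ j →
      pvAltLoop n d total = total + ∑ x ∈ Finset.Ico d (Nat.sqrt n + 1), pvC n x := by
  intro j
  induction j with
  | zero =>
    intro d total hj
    have hd : Nat.sqrt n < d := by omega
    have hstop : ¬ (d * d ≤ n) := by
      intro hle
      exact absurd (Nat.le_sqrt.mpr hle) (by omega)
    rw [pvAltLoop, dif_neg hstop, Finset.Ico_eq_empty (by omega)]
    simp
  | succ j ih =>
    intro d total hj
    by_cases hle : d * d ≤ n
    · have hds : d ≤ Nat.sqrt n := Nat.le_sqrt.mpr hle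
      rw [pvAltLoop, dif_pos hle, ih (d + 1) _ (by omega)]
      rw [show (∑ x ∈ Finset.Ico d (Nat.sqrt n + 1), pvC n x)
            = pvC n d + ∑ x ∈ Finset.Ico (d + 1) (Nat.sqrt n + 1), pvC n x from
          Finset.sum_eq_sum_Ico_succ_bot (by omega) (pvC n)]
      have hbody :
          (if n % d = 0 then
            (let t2 := if d % 2 = 0 then total + (d : Int) else total
             let q := n / d
             if q ≠ d ∧ q ≠ n ∧ q % 2 = 0 then t2 + (q : Int) else t2)
           else total) = total + pvC n d := by
        unfold pvC
        split_ifs <;> (simp_all; try ring)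
      rw [hbody]
      ring
    · have hd : Nat.sqrt n < d := by
        by_contra hc
        exact hle (Nat.le_sqrt.mp (by omega))
      rw [pvAltLoop, dif_neg hle, Finset.Ico_eq_empty (by omega)]
      simp

theorem pv_small_filter (n : Nat) (hn : 2 ≤ n) :
    (Finset.Ico 1 (Nat.sqrt n + 1)).filter (fun d => n % d = 0 ∧ d % 2 = 0)
      = (pvTarget n).filter (fun d => d ≤ Nat.sqrt n) := by
  have hs : Nat.sqrt n < n := Nat.sqrt_lt_self (by omega)
  ext d
  simp only [Finset.mem_filter, Finset.mem_Ico, pvTarget, Nat.mem_divisors]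
  constructor
  · rintro ⟨⟨h1, h2⟩, h3, h4⟩
    exact ⟨⟨⟨Nat.dvd_of_mod_eq_zero h3, by omega⟩, h4, by omega⟩, by omega⟩
  · rintro ⟨⟨⟨hdvd, -⟩, h4, -⟩, h5⟩
    have hpos : 0 < d := by
      rcases Nat.eq_zero_or_pos d with h0 | h0
      · subst h0; rw [Nat.zero_dvd] at hdvd; omega
      · exact h0
    exact ⟨⟨by omega, by omega⟩, pv_mod_eq_zero hdvd, h4⟩

theorem pv_big_image (n : Nat) (hn : 2 ≤ n) :
    ((Finset.Ico 1 (Nat.sqrt n + 1)).filter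
        (fun d => n % d = 0 ∧ n / d ≠ d ∧ n / d ≠ n ∧ (n / d) % 2 = 0)).image (fun d => n / d)
      = (pvTarget n).filter (fun d => ¬ d ≤ Nat.sqrt n) := by
  have hss : Nat.sqrt n * Nat.sqrt n ≤ n := Nat.le_sqrt.mp le_rfl
  have hn0 : n ≠ 0 := by omega
  ext e
  simp only [Finset.mem_image, Finset.mem_filter, Finset.mem_Ico, pvTarget, Nat.mem_divisors]
  constructor
  · rintro ⟨d, ⟨⟨hd1, hd2⟩, hmod, hneq, hnen, hev⟩, rfl⟩
    have hdvd : d ∣ n := Nat.dvd_of_mod_eq_zero hmod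
    have hmul : n / d * d = n := Nat.div_mul_cancel hdvd
    have hqdvd : n / d ∣ n := ⟨d, hmul.symm⟩
    have hds : d ≤ Nat.sqrt n := by omega
    refine ⟨⟨⟨hqdvd, hn0⟩, hev, hnen⟩, ?_⟩
    intro hqs
    rcases Nat.lt_or_ge (n / d) d with hlt | hge
    · have : n < n := by
        calc n = n / d * d := hmul.symm
          _ < d * d := (Nat.mul_lt_mul_right (by omega : 0 < d)).mpr hlt
          _ ≤ Nat.sqrt n * Nat.sqrt n := Nat.mul_le_mul hds hds
          _ ≤ n := hss
      omega
    · have hlt2 : d < n / d := by omega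
      have : n < n := by
        calc n = n / d * d := hmul.symm
          _ < n / d * (n / d) := (Nat.mul_lt_mul_left (by omega : 0 < n / d)).mpr hlt2
          _ ≤ Nat.sqrt n * Nat.sqrt n := Nat.mul_le_mul hqs hqs
          _ ≤ n := hss
      omega
  · rintro ⟨⟨⟨hdvd, -⟩, hev, hnen⟩, hgt⟩
    have hepos : 0 < e := by
      rcases Nat.eq_zero_or_pos e with h0 | h0
      · subst h0; rw [Nat.zero_dvd] at hdvd; omega
      · exact h0
    have hlt : n < e * e := by
      by_contra hc
      exact hgt (Nat.le_sqrt.mpr (by omega))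
    have hde : n / e < e := (Nat.div_lt_iff_lt_mul hepos).mpr hlt
    have hmul : n / e * e = n := Nat.div_mul_cancel hdvd
    have hdpos : 0 < n / e :=
      (Nat.one_le_div_iff hepos).mpr (Nat.le_of_dvd (by omega) hdvd)
    have hdle : n / e ≤ Nat.sqrt n := by
      apply Nat.le_sqrt.mpr
      calc n / e * (n / e) ≤ n / e * e := Nat.mul_le_mul_left _ (by omega)
        _ = n := hmul
    have hddvd : n / e ∣ n := ⟨e, by omega⟩
    have hback : n / (n / e) = e := Nat.div_div_self hdvd hn0
    refine ⟨n / e, ⟨⟨by omega, by omega⟩, pv_mod_eq_zero hddvd,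
      ?_, ?_, ?_⟩, hback⟩
    · rw [hback]; omega
    · rw [hback]; exact hnen
    · rw [hback]; exact hev

theorem pv_B_eq_sum (n : Nat) (hn : 2 ≤ n) :
    add_divisibles_alt (n : Int) = ∑ d ∈ pvTarget n, (d : Int) := by
  have hgt : ¬ ((n : Int) ≤ 1) := by exact_mod_cast by omega
  rw [add_divisibles_alt, if_neg hgt, Int.toNat_natCast]
  rw [pv_loop_eq_sum n (Nat.sqrt n + 1) 1 0 (by omega), zero_add]
  unfold pvC
  rw [Finset.sum_add_distrib, ← Finset.sum_filter, ← Finset.sum_filter,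
    pv_small_filter n hn]
  have hinj : ∀ d₁ ∈ (Finset.Ico 1 (Nat.sqrt n + 1)).filter
        (fun d => n % d = 0 ∧ n / d ≠ d ∧ n / d ≠ n ∧ (n / d) % 2 = 0),
      ∀ d₂ ∈ (Finset.Ico 1 (Nat.sqrt n + 1)).filter
        (fun d => n % d = 0 ∧ n / d ≠ d ∧ n / d ≠ n ∧ (n / d) % 2 = 0),
      n / d₁ = n / d₂ → d₁ = d₂ := by
    intro d₁ h₁ d₂ h₂ heq
    simp only [Finset.mem_filter, Finset.mem_Ico] at h₁ h₂
    have hv₁ : d₁ ∣ n := Nat.dvd_of_mod_eq_zero h₁.2.1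
    have hv₂ : d₂ ∣ n := Nat.dvd_of_mod_eq_zero h₂.2.1
    have hn0 : n ≠ 0 := by omega
    rw [← Nat.div_div_self hv₁ hn0, heq, Nat.div_div_self hv₂ hn0]
  rw [show (∑ x ∈ (Finset.Ico 1 (Nat.sqrt n + 1)).filter
        (fun d => n % d = 0 ∧ n / d ≠ d ∧ n / d ≠ n ∧ (n / d) % 2 = 0), ((n / x : Nat) : Int))
      = ∑ e ∈ ((Finset.Ico 1 (Nat.sqrt n + 1)).filter
        (fun d => n % d = 0 ∧ n / d ≠ d ∧ n / d ≠ n ∧ (n / d) % 2 = 0)).image (fun d => n / d),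
        ((e : Nat) : Int) from (Finset.sum_image hinj).symm]
  rw [pv_big_image n hn]
  exact Finset.sum_filter_add_sum_filter_not (pvTarget n) (fun d => d ≤ Nat.sqrt n) _

theorem pv_Ico_eq_target (n : Nat) (hn : 2 ≤ n) :
    (∑ d ∈ Finset.Ico 1 n, (if n % d = 0 ∧ d % 2 = 0 then (d : Int) else 0))
      = ∑ d ∈ pvTarget n, (d : Int) := by
  rw [← Finset.sum_filter]
  apply Finset.sum_congr _ (fun _ _ => rfl)
  ext d
  simp only [Finset.mem_filter, Finset.mem_Ico, pvTarget, Nat.mem_divisors]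
  constructor
  · rintro ⟨⟨h1, h2⟩, h3, h4⟩
    exact ⟨⟨Nat.dvd_of_mod_eq_zero h3, by omega⟩, h4, by omega⟩
  · rintro ⟨⟨hdvd, -⟩, h4, h5⟩
    have hpos : 0 < d := by
      rcases Nat.eq_zero_or_pos d with h0 | h0
      · subst h0; rw [Nat.zero_dvd] at hdvd; omega
      · exact h0
    have hle : d ≤ n := Nat.le_of_dvd (by omega) hdvd
    exact ⟨⟨by omega, by omega⟩, pv_mod_eq_zero hdvd, h4⟩

-- ===== VERDICT (by name: the statement is the Claim_ definition above) =====
theorem add_divisibles_spec : Claim_equal_add_divisibles := by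
  intro num _
  unfold Spec_add_divisibles
  by_cases h : num ≤ 1
  · rw [add_divisibles, add_divisibles_alt, if_pos h, if_pos h]
  · have hn : 2 ≤ num.toNat := by omega
    have hnum : ((num.toNat : Nat) : Int) = num := by omega
    rw [← hnum, pv_A_eq_sum _ hn, pv_B_eq_sum _ hn, pv_Ico_eq_target _ hn]
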